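-- pv_equiv track=rewrite | github.com/sapnadeshmukh/Web_Scraping | task3.py | group_by_decade
-- ===== SOURCE A (Python) =====
-- def group_by_decade(movies):
--     dic_of_movies={}
--     list1=[]
--     for movie in movies:
--         movie_year=movie%10
--         decade=movie-movie_year
--         if decade not in list1:
--             list1.append(decade)
--     list1.sort()
--     for year in list1:
--
--
--         dic_of_movies[year]=[]
--     for year in dic_of_movies:
--         decaderange=year+9
--         for x in movies:
--             if x<=decaderange and x>=year:
--                 for v in movies[x]:
--                     dic_of_movies[year].append(v)
--     return(dic_of_movies)
-- ===== SOURCE B (Python) =====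
-- def group_by_decade(movies):
--     buckets = {}
--     for year, titles in movies.items():
--         decade = year - year % 10
--         buckets.setdefault(decade, []).extend(titles)
--     return {decade: buckets[decade] for decade in sorted(buckets)}
-- ===== Notes on version B (the rewrite author's own statement) =====
-- stated objective: faster
-- what changed: A dedups decades with a list membership scan, sorts them, then for every decade rescans the whole dict testing each year against the decade range (O(d*n)); B makes a single pass bucketing each year's titles into its decade via year - year % 10 and then emits the buckets under their sorted keys (O(n log n)).
import Mathlib
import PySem

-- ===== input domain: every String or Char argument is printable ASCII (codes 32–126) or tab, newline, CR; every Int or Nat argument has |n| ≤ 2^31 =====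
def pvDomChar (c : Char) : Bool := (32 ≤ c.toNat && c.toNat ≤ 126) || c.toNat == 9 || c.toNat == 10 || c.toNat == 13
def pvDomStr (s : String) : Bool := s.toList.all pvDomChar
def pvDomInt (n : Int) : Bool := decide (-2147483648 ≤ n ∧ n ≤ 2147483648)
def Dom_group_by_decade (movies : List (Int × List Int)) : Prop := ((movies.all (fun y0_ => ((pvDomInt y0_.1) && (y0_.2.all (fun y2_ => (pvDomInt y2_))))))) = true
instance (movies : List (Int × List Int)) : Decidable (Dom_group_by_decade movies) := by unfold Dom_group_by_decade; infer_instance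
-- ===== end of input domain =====

-- B replaces A's per-decade rescan of the whole dict with a single bucketing pass: O(n log n) vs O(d*n).

-- ===== PORT A =====
def group_by_decade (movies : List (Int × List Int)) : List (Int × List Int) :=
  let mdict : PySem.Dict Int (List Int) := PySem.Dict.ofList movies
  let list1 : List Int := mdict.keys.foldl (fun l movie =>
      let movie_year := PySem.Int.mod movie 10
      let decade := movie - movie_year
      if decade ∈ l then l else l ++ [decade]) []
  let list1s := PySem.List.sorted list1 (fun x => x) false
  let dic : PySem.Dict Int (List Int) :=
    list1s.foldl (fun d year => d.insert year ([] : List Int)) PySem.Dict.empty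
  let dic2 := dic.keys.foldl (fun d year =>
      let decaderange := year + 9
      mdict.keys.foldl (fun d x =>
        if x ≤ decaderange ∧ year ≤ x then
          (mdict.getD x []).foldl (fun d v => d.modify year [] (fun l => l ++ [v])) d
        else d) d) dic
  dic2.items

-- ===== PORT B =====
def group_by_decade_alt (movies : List (Int × List Int)) : List (Int × List Int) :=
  let mdict : PySem.Dict Int (List Int) := PySem.Dict.ofList movies
  let buckets : PySem.Dict Int (List Int) := mdict.items.foldl (fun b p =>
      let decade := p.1 - PySem.Int.mod p.1 10
      b.insert decade (b.getD decade [] ++ p.2)) PySem.Dict.empty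
  (PySem.List.sorted buckets.keys (fun x => x) false).map (fun d => (d, buckets.getD d []))

-- ===== PRECONDITION & SPEC =====
def Spec_group_by_decade (movies : List (Int × List Int)) (out : List (Int × List Int)) : Prop := out = group_by_decade_alt movies
instance (movies : List (Int × List Int)) (out : List (Int × List Int)) : Decidable (Spec_group_by_decade movies out) := by unfold Spec_group_by_decade; infer_instance

-- ===== CLAIM (what is proved, stated in full; the proofs are below) =====
def Claim_equal_group_by_decade : Prop := ∀ (movies : List (Int × List Int)), Dom_group_by_decade movies → Spec_group_by_decade movies (group_by_decade movies)

-- ===== LEMMAS AND PROOFS =====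

-- the decade of a year, Python's  y - y % 10
def pvDec (m : Int) : Int := m - PySem.Int.mod m 10

theorem pvDec_dvd (m : Int) : (10 : Int) ∣ pvDec m := by
  have h := PySem.Int.floordiv_mul_add_mod m 10
  exact ⟨PySem.Int.floordiv m 10, by unfold pvDec; omega⟩

-- range test ↔ decade equality, for a decade-valued y
theorem pvRange_iff (x y : Int) (hy : (10 : Int) ∣ y) :
    (x ≤ y + 9 ∧ y ≤ x) ↔ pvDec x = y := by
  obtain ⟨k, hk⟩ := hy
  have h1 := PySem.Int.floordiv_mul_add_mod x 10
  have h2 := PySem.Int.mod_nonneg x (b := 10) (by omega)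
  have h3 := PySem.Int.mod_lt x (b := 10) (by omega)
  unfold pvDec
  omega

-- A's dedup loop builds exactly set(map(pvDec, ks))
theorem pv_list1_eq (ks : List Int) :
    ks.foldl (fun l movie => if pvDec movie ∈ l then l else l ++ [pvDec movie]) []
      = PySem.Set.ofList (ks.map pvDec) := by
  have hf : (fun (l : List Int) (m : Int) => if pvDec m ∈ l then l else l ++ [pvDec m])
      = fun l m => PySem.Set.add l (pvDec m) := by
    funext l m; rw [PySem.Set.add_eq_ite]
  rw [hf, ← PySem.Set.update_map_eq_foldl_add, PySem.Set.update_nil_left]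

-- B's bucketing pass: value at key d is the concatenation of the titles of d's years, in order
theorem pv_buckets_getD (its : List (Int × List Int)) (b : PySem.Dict Int (List Int)) (d : Int) :
    (its.foldl (fun b p => b.insert (pvDec p.1) (b.getD (pvDec p.1) [] ++ p.2)) b).getD d []
      = b.getD d [] ++ (its.filter (fun p => pvDec p.1 == d)).flatMap (·.2) := by
  induction its generalizing b with
  | nil => simp
  | cons p rest ih =>
    simp only [List.foldl_cons, ih, List.filter_cons]
    by_cases h : pvDec p.1 = d
    · simp [h]
    · simp [PySem.Dict.getD_insert, h, Ne.symm h]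

-- the inner  for v in movies[x]: dic[year].append(v)  loop, at the dict level
theorem pv_appendloop_getD_self (vals : List Int) (d : PySem.Dict Int (List Int)) (y : Int) :
    (vals.foldl (fun d v => d.modify y [] (fun l => l ++ [v])) d).getD y [] = d.getD y [] ++ vals := by
  induction vals generalizing d with
  | nil => simp
  | cons v rest ih => simp [ih, PySem.Dict.getD_modify_self]

theorem pv_appendloop_getD_ne (vals : List Int) (d : PySem.Dict Int (List Int)) (y z : Int) (hz : z ≠ y) :
    (vals.foldl (fun d v => d.modify y [] (fun l => l ++ [v])) d).getD z [] = d.getD z [] := by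
  induction vals generalizing d with
  | nil => rfl
  | cons v rest ih => simp [ih, PySem.Dict.getD_modify_of_ne _ _ _ hz]

theorem pv_appendloop_keys (vals : List Int) (d : PySem.Dict Int (List Int)) (y : Int) (hy : y ∈ d.keys) :
    (vals.foldl (fun d v => d.modify y [] (fun l => l ++ [v])) d).keys = d.keys := by
  induction vals generalizing d with
  | nil => rfl
  | cons v rest ih =>
    have hk : (d.modify y [] (fun l => l ++ [v])).keys = d.keys := by
      rw [PySem.Dict.keys_modify, PySem.Dict.keys_insert_of_contains]
      exact (PySem.Dict.contains_iff_mem_keys _ _).2 hy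
    simp only [List.foldl_cons]
    rw [ih _ (by rw [hk]; exact hy), hk]

-- one outer iteration (fixed year) of A's grouping loop
theorem pv_inner (ks : List Int) (g : Int → List Int) (y : Int) (d : PySem.Dict Int (List Int))
    (hy : y ∈ d.keys) :
    (ks.foldl (fun d x => if x ≤ y + 9 ∧ y ≤ x then
        (g x).foldl (fun d v => d.modify y [] (fun l => l ++ [v])) d else d) d).keys = d.keys ∧
    (ks.foldl (fun d x => if x ≤ y + 9 ∧ y ≤ x then
        (g x).foldl (fun d v => d.modify y [] (fun l => l ++ [v])) d else d) d).getD y []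
      = d.getD y [] ++ (ks.filter (fun x => decide (x ≤ y + 9 ∧ y ≤ x))).flatMap g ∧
    ∀ z, z ≠ y → (ks.foldl (fun d x => if x ≤ y + 9 ∧ y ≤ x then
        (g x).foldl (fun d v => d.modify y [] (fun l => l ++ [v])) d else d) d).getD z []
      = d.getD z [] := by
  induction ks generalizing d with
  | nil => exact ⟨rfl, by simp, fun z _ => rfl⟩
  | cons x rest ih =>
    simp only [List.foldl_cons, List.filter_cons]
    by_cases h : x ≤ y + 9 ∧ y ≤ x
    · have hk := pv_appendloop_keys (g x) d y hy
      obtain ⟨ik, iy, iz⟩ := ih (d := (g x).foldl (fun d v => d.modify y [] (fun l => l ++ [v])) d)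
        (by rw [hk]; exact hy)
      refine ⟨by simp only [if_pos h]; rw [ik, hk], ?_, ?_⟩
      · simp only [if_pos h, decide_eq_true h]
        rw [iy, pv_appendloop_getD_self]; simp
      · intro z hz
        simp only [if_pos h]
        rw [iz z hz, pv_appendloop_getD_ne _ _ _ _ hz]
    · obtain ⟨ik, iy, iz⟩ := ih (d := d) hy
      refine ⟨by simp only [if_neg h]; exact ik, ?_, ?_⟩
      · simp only [if_neg h, decide_eq_false h]
        exact iy
      · intro z hz; simp only [if_neg h]; exact iz z hz

-- A's full grouping loop over the decade keys
theorem pv_outer (ks : List Int) (g : Int → List Int) (L : List Int) (d : PySem.Dict Int (List Int))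
    (hnd : L.Nodup) (hsub : ∀ y ∈ L, y ∈ d.keys) :
    (L.foldl (fun d year => ks.foldl (fun d x => if x ≤ year + 9 ∧ year ≤ x then
        (g x).foldl (fun d v => d.modify year [] (fun l => l ++ [v])) d else d) d) d).keys = d.keys ∧
    ∀ z, (L.foldl (fun d year => ks.foldl (fun d x => if x ≤ year + 9 ∧ year ≤ x then
        (g x).foldl (fun d v => d.modify year [] (fun l => l ++ [v])) d else d) d) d).getD z []
      = d.getD z [] ++ (if z ∈ L then
          (ks.filter (fun x => decide (x ≤ z + 9 ∧ z ≤ x))).flatMap g else []) := by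
  induction L generalizing d with
  | nil => exact ⟨rfl, by simp⟩
  | cons y rest ih =>
    obtain ⟨hk, hy, hz⟩ := pv_inner ks g y d (hsub y (.head _))
    obtain ⟨ik, iv⟩ := ih _ hnd.of_cons (fun w hw => by rw [hk]; exact hsub w (.tail _ hw))
    refine ⟨by simp only [List.foldl_cons]; rw [ik, hk], fun z => ?_⟩
    simp only [List.foldl_cons]
    rw [iv z]
    by_cases hzy : z = y
    · subst hzy
      have : z ∉ rest := (List.nodup_cons.1 hnd).1
      simp [this, hy]
    · rw [hz z hzy]
      simp [hzy]

-- building  dic[year] = []  over the sorted decades: every lookup (default []) is []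
theorem pv_dic0_getD (L : List Int) (d : PySem.Dict Int (List Int)) (z : Int) (h : d.getD z [] = []) :
    (L.foldl (fun d year => d.insert year ([] : List Int)) d).getD z [] = [] := by
  induction L generalizing d with
  | nil => exact h
  | cons y rest ih =>
    simp only [List.foldl_cons]
    exact ih _ (by rw [PySem.Dict.getD_insert]; split <;> simp [h])

-- fold over the dict's keys with lookups = fold over its items
theorem pv_gather_eq (its : List (Int × List Int)) (md : PySem.Dict Int (List Int)) (q : Int → Bool)
    (h : ∀ p ∈ its, md.getD p.1 [] = p.2) :
    ((its.map Prod.fst).filter q).flatMap (fun x => md.getD x [])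
      = (its.filter (fun p => q p.1)).flatMap (·.2) := by
  induction its with
  | nil => rfl
  | cons p rest ih =>
    simp only [List.map_cons, List.filter_cons]
    by_cases hq : q p.1
    · simp [hq, h p (.head _), ih (fun w hw => h w (.tail _ hw))]
    · simp [hq, ih (fun w hw => h w (.tail _ hw))]

theorem group_by_decade_spec : Claim_equal_group_by_decade := by
  intro movies _
  unfold Spec_group_by_decade group_by_decade group_by_decade_alt
  simp only [show ∀ m : Int, m - PySem.Int.mod m 10 = pvDec m from fun _ => rfl]
  have hnd : (PySem.Dict.ofList movies).keys.Nodup := PySem.Dict.nodup_keys_ofList movies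
  have hget : ∀ p ∈ (PySem.Dict.ofList movies).items,
      (PySem.Dict.ofList movies).getD p.1 [] = p.2 := by
    intro p hp
    exact PySem.Dict.getD_of_mem_items _ (by simpa using hp) hnd []
  -- A's dedup list and B's bucket keys are the same list of decades
  rw [pv_list1_eq, PySem.Dict.keys_foldl_insert_key, PySem.Dict.keys_empty,
    PySem.Set.update_nil_left]
  have hkk : (PySem.Dict.ofList movies).keys.map pvDec
      = (PySem.Dict.ofList movies).items.map (fun p => pvDec p.1) := by
    simp only [PySem.Dict.keys, List.map_map]; rfl
  simp only [show (fun (year : Int) => year) = (id : Int → Int) from rfl, List.map_id]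
  -- name the sorted decade list
  have hLnd : (PySem.List.sorted (PySem.Set.ofList
      ((PySem.Dict.ofList movies).keys.map pvDec)) (id : Int → Int) false).Nodup :=
    ((PySem.List.sorted_perm _ _ _).nodup_iff).mpr (PySem.Set.nodup_ofList _)
  rw [PySem.Set.ofList_eq_self_of_nodup _ hLnd]
  -- B's bucket keys
  rw [PySem.Dict.keys_foldl_insert_key, PySem.Dict.keys_empty, PySem.Set.update_nil_left, ← hkk]
  set md := PySem.Dict.ofList movies with hmd
  set Ls := PySem.List.sorted (PySem.Set.ofList (md.keys.map pvDec)) (id : Int → Int) false with hLs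
  -- the empty-initialised decade dict
  have h0keys : (Ls.foldl (fun d year => d.insert year ([] : List Int)) PySem.Dict.empty).keys = Ls := by
    rw [PySem.Dict.keys_foldl_insert Ls (fun _ _ => []) _, PySem.Dict.keys_empty,
      PySem.Set.update_nil_left, PySem.Set.ofList_eq_self_of_nodup _ hLnd]
  obtain ⟨hok, hov⟩ := pv_outer md.keys (fun x => md.getD x []) Ls
      (Ls.foldl (fun d year => d.insert year ([] : List Int)) PySem.Dict.empty) hLnd
      (fun y hy => by rw [h0keys]; exact hy)
  rw [PySem.Dict.items_eq_map_keys _ (by rw [hok, h0keys]; exact hLnd) ([] : List Int), hok, h0keys]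
  simp only [pv_buckets_getD, PySem.Dict.getD_empty, List.nil_append]
  refine List.map_congr_left (fun k hk => ?_)
  rw [hov k, if_pos hk, pv_dic0_getD Ls _ k (PySem.Dict.getD_empty k []), List.nil_append]
  obtain ⟨m, -, hm⟩ := List.mem_map.1 ((PySem.Set.mem_ofList _ _).1 ((PySem.List.mem_sorted _ _ _ _).1 hk))
  have hk10 : (10 : Int) ∣ k := hm ▸ pvDec_dvd m
  rw [show md.keys = md.items.map Prod.fst from rfl, pv_gather_eq md.items md _ hget,
    List.filter_congr (fun p _ => show decide (p.1 ≤ k + 9 ∧ k ≤ p.1) = (pvDec p.1 == k) by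
      rw [Bool.eq_iff_iff]; simp [pvRange_iff p.1 k hk10])]
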